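-- pv_equiv track=rewrite | github.com/kis619/SoftUni_Python_Advanced | 2. Tuples and sets/LAB/05. SoftUni Party.py | order_noshows
-- ===== SOURCE A (Python) =====
-- def order_noshows(guest_list):
--     vips = []
--     regulars = []
--
--     for guest in guest_list:
--         if guest[0].isdigit():
--             vips.append(guest)
--         else:
--             regulars.append(guest)
--
--     vips_sorted = sorted(vips)
--     regulars_sorted = sorted(regulars)
--
--     return vips_sorted + regulars_sorted
-- ===== SOURCE B (Python) =====
-- def order_noshows(guest_list):
--     return sorted(guest_list, key=lambda g: (not g[0].isdigit(), g))
-- ===== Notes on version B (the rewrite author's own statement) =====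
-- stated objective: idiomatic
-- what changed: B replaces the partition loop, two separate sorts and a concatenation with a single sorted() call over the whole list using the composite key (not g[0].isdigit(), g).
import Mathlib
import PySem

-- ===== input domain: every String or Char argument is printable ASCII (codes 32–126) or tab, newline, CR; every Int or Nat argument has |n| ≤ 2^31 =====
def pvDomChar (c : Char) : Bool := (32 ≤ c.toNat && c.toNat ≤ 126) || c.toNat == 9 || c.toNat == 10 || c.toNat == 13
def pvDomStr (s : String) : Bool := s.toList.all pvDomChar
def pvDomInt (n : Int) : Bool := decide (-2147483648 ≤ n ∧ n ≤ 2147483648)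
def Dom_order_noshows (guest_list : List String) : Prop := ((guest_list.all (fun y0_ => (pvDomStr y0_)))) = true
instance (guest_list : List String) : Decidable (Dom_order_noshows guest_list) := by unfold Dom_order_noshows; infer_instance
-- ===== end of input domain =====

-- B replaces A's partition loop + two sorts + concatenation by ONE sorted() call with
-- the composite key (not g[0].isdigit(), g); same asymptotic cost, more idiomatic.

-- ===== PORT A =====
-- guest[0].isdigit() : first character of the guest string is a digit (false kept total where Python raises IndexError; Pre_ excludes that)
def pvVipA (g : String) : Bool :=
  match PySem.Str.pyGet? g 0 with
  | some c => PySem.Chars.isdigit c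
  | none => false

def order_noshows (guest_list : List String) : List String :=
  -- the partition loop over guest_list, appending into (vips, regulars)
  let pr := guest_list.foldl
    (fun (acc : List String × List String) guest =>
      if pvVipA guest then (acc.1 ++ [guest], acc.2) else (acc.1, acc.2 ++ [guest]))
    ([], [])
  PySem.List.sorted pr.1 (fun x => x) false ++ PySem.List.sorted pr.2 (fun x => x) false

-- ===== PORT B =====
-- the composite sort key: (not g[0].isdigit(), g) (first component; false kept total where Python raises IndexError)
def pvKeyB (g : String) : Bool :=
  match PySem.Str.pyGet? g 0 with
  | some c => !PySem.Chars.isdigit c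
  | none => false

def order_noshows_alt (guest_list : List String) : List String :=
  PySem.List.sorted2 guest_list (fun g => pvKeyB g) (fun g => g) false

-- ===== PRECONDITION & SPEC =====
-- Pre_ excludes lists containing the empty string, on which the Python A (and B) raises IndexError at guest[0].
def Pre_order_noshows (guest_list : List String) : Prop := ∀ g ∈ guest_list, g ≠ ""
instance (guest_list : List String) : Decidable (Pre_order_noshows guest_list) := by unfold Pre_order_noshows; infer_instance
def pvWitness_order_noshows : List String := ["2pac", "alice", "50cent", "Bob"]

def Spec_order_noshows (guest_list : List String) (out : List String) : Prop := out = order_noshows_alt guest_list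
instance (guest_list : List String) (out : List String) : Decidable (Spec_order_noshows guest_list out) := by unfold Spec_order_noshows; infer_instance

-- ===== CLAIM (what is proved, stated in full; the proofs are below) =====
def Claim_equal_order_noshows : Prop := ∀ (guest_list : List String), Dom_order_noshows guest_list → Pre_order_noshows guest_list → Spec_order_noshows guest_list (order_noshows guest_list)

-- ===== LEMMAS AND PROOFS =====

-- the lexicographic key that B's single sort orders by
def pvK (g : String) : Lex (Bool × String) := toLex (pvKeyB g, g)

theorem pvK_injective : Function.Injective pvK := by
  intro a b h
  have := congrArg (fun x => (ofLex x).2) h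
  simpa [pvK] using this

-- A's partition loop is two filters
theorem pvPartition (l : List String) (acc : List String × List String) :
    l.foldl
      (fun (acc : List String × List String) guest =>
        if pvVipA guest then (acc.1 ++ [guest], acc.2) else (acc.1, acc.2 ++ [guest]))
      acc
    = (acc.1 ++ l.filter pvVipA, acc.2 ++ l.filter (fun g => !pvVipA g)) := by
  induction l generalizing acc with
  | nil => simp
  | cons x xs ih =>
    by_cases h : pvVipA x = true <;> simp [h, ih]

-- B's two-key sort is a one-key sort by the lexicographic pair
theorem pvSorted2_eq (xs : List String) :
    PySem.List.sorted2 xs (fun g => pvKeyB g) (fun g => g) false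
      = PySem.List.sorted xs pvK false := by
  have hbef : (fun (a b : String) => decide (pvKeyB a < pvKeyB b) || (!decide (pvKeyB b < pvKeyB a) && decide (a < b)))
      = fun a b => decide (pvK a < pvK b) := by
    funext a b
    simp only [pvK, Prod.Lex.lt_iff, ofLex_toLex]
    rcases lt_trichotomy (pvKeyB a) (pvKeyB b) with h | h | h
    · simp [h, not_lt.mpr (le_of_lt h)]
    · simp [h]
    · simp [h, not_lt.mpr (le_of_lt h), ne_of_gt h]
  unfold PySem.List.sorted2 PySem.List.sorted
  exact congrArg (fun f => List.foldl (fun acc x => PySem.List.insertBy f x acc) ([] : List String) xs) hbef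

theorem pvVip_key (g : String) (hg : g ≠ "") : pvKeyB g = !pvVipA g := by
  unfold pvKeyB pvVipA
  cases h : PySem.Str.pyGet? g 0 with
  | some c => simp
  | none =>
    exfalso
    apply hg
    have := PySem.Str.pyGet?_natCast g 0
    simp only [Nat.cast_zero] at this
    rw [this] at h
    cases hl : g.toList with
    | nil => exact String.ext (by simp [hl])
    | cons x xs => simp [hl] at h

-- ===== VERDICT (by name: the statement is the Claim_ definition above) =====
theorem order_noshows_spec : Claim_equal_order_noshows := by
  intro gl _ hpre
  unfold Spec_order_noshows order_noshows order_noshows_alt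
  rw [pvSorted2_eq, pvPartition]
  simp only [List.nil_append]
  -- both sides are permutations of gl that are Pairwise-ordered by the injective key pvK
  refine PySem.List.eq_of_perm_of_pairwise_le_of_injective pvK pvK_injective ?_ ?_ ?_
  · -- permutation
    refine ((List.Perm.append (PySem.List.sorted_perm _ _ _) (PySem.List.sorted_perm _ _ _)).trans
      (List.filter_append_perm pvVipA gl)).trans (PySem.List.sorted_perm gl pvK false).symm
  · -- A's output is Pairwise (pvK · ≤ pvK ·)
    rw [List.pairwise_append]
    refine ⟨?_, ?_, ?_⟩
    · refine (PySem.List.sorted_pairwise (gl.filter pvVipA) (fun x => x)).imp_of_mem ?_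
      intro a b ha hb hle
      rw [PySem.List.mem_sorted] at ha hb
      have hga : a ∈ gl := (List.mem_filter.mp ha).1
      have hgb : b ∈ gl := (List.mem_filter.mp hb).1
      have ka : pvKeyB a = false := by
        rw [pvVip_key a (hpre a hga)]; simp [(List.mem_filter.mp ha).2]
      have kb : pvKeyB b = false := by
        rw [pvVip_key b (hpre b hgb)]; simp [(List.mem_filter.mp hb).2]
      rw [pvK, pvK, Prod.Lex.le_iff]
      exact Or.inr ⟨by simp [ka, kb], hle⟩
    · refine (PySem.List.sorted_pairwise (gl.filter (fun g => !pvVipA g)) (fun x => x)).imp_of_mem ?_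
      intro a b ha hb hle
      rw [PySem.List.mem_sorted] at ha hb
      have hga : a ∈ gl := (List.mem_filter.mp ha).1
      have hgb : b ∈ gl := (List.mem_filter.mp hb).1
      have ka : pvKeyB a = true := by
        rw [pvVip_key a (hpre a hga)]
        have := (List.mem_filter.mp ha).2; simpa using this
      have kb : pvKeyB b = true := by
        rw [pvVip_key b (hpre b hgb)]
        have := (List.mem_filter.mp hb).2; simpa using this
      rw [pvK, pvK, Prod.Lex.le_iff]
      exact Or.inr ⟨by simp [ka, kb], hle⟩
    · intro a ha b hb
      rw [PySem.List.mem_sorted] at ha hb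
      have hga : a ∈ gl := (List.mem_filter.mp ha).1
      have hgb : b ∈ gl := (List.mem_filter.mp hb).1
      have ka : pvKeyB a = false := by
        rw [pvVip_key a (hpre a hga)]; simp [(List.mem_filter.mp ha).2]
      have kb : pvKeyB b = true := by
        rw [pvVip_key b (hpre b hgb)]
        have := (List.mem_filter.mp hb).2; simpa using this
      rw [pvK, pvK, Prod.Lex.le_iff]
      exact Or.inl (by simp [ka, kb])
  · exact PySem.List.sorted_pairwise gl pvK
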